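-- pv_equiv track=rewrite | github.com/epilectrik/voynich | archive/scripts/currier_a_clustering_hmm.py | calculate_run_lengths
-- ===== SOURCE A (Python) =====
-- from collections import Counter
--
-- def calculate_run_lengths(sequence):
--     """Calculate run-length distribution for state 1 (clustered)."""
--     runs = []
--     current_run = 0
--     in_run = False
--
--     for x in sequence:
--         if x == 1:
--             current_run += 1
--             in_run = True
--         else:
--             if in_run and current_run > 0:
--                 runs.append(current_run)
--             current_run = 0
--             in_run = False
--
--     if in_run and current_run > 0:
--         runs.append(current_run)
--
--     return Counter(runs)
-- ===== SOURCE B (Python) =====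
-- from collections import Counter
--
-- def calculate_run_lengths(sequence):
--     """Calculate run-length distribution for state 1 (clustered)."""
--     seq = list(sequence)
--     n = len(seq)
--     starts = [i for i in range(n) if seq[i] == 1 and (i == 0 or seq[i - 1] != 1)]
--     ends = [i for i in range(n) if seq[i] == 1 and (i == n - 1 or seq[i + 1] != 1)]
--     return Counter(e - s + 1 for s, e in zip(starts, ends))
-- ===== Notes on version B (the rewrite author's own statement) =====
-- stated objective: alternative
-- what changed: Replaces the run-tracking state machine (current_run/in_run with boundary flushes) by a boundary-index method: two index scans collect the run-start positions (a 1 whose predecessor is not 1) and run-end positions (a 1 whose successor is not 1), the k-th start is paired with the k-th end by zip, and each run length is end - start + 1; no running counter or flag is maintained.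
import Mathlib
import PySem

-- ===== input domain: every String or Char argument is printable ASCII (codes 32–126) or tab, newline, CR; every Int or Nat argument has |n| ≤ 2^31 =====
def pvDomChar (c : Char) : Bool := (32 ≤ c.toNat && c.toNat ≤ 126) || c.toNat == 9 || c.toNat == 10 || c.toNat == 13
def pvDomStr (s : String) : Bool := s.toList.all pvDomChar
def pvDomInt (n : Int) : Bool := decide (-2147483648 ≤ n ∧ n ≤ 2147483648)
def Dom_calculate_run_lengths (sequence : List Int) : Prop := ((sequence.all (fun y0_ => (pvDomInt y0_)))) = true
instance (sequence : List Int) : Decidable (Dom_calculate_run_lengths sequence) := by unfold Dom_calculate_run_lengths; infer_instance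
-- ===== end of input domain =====

-- B replaces A's current_run/in_run state machine by a boundary-index method: collect the
-- run-start indices and run-end indices in two scans, pair them by zip, length = end - start + 1.

-- ===== PORT A =====
-- state = (runs, current_run, in_run), exactly A's loop; then the trailing flush; then Counter(runs).
def calculate_run_lengths (sequence : List Int) : List (Int × Int) :=
  let st := sequence.foldl
    (fun (s : List Int × Int × Bool) x =>
      if x == 1 then (s.1, s.2.1 + 1, true)
      else ((if s.2.2 && decide (s.2.1 > 0) then s.1 ++ [s.2.1] else s.1), 0, false))
    ([], 0, false)
  let runs := if st.2.2 && decide (st.2.1 > 0) then st.1 ++ [st.2.1] else st.1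
  (PySem.Dict.counter runs).items

-- ===== PORT B =====
-- The two index comprehensions of Source B. Every seq[j] access is in range when evaluated
-- (the `or` short-circuits i-1 at i=0; i+1 is guarded by i == n-1), so getD with default 0
-- is exact: the default is returned only where Python short-circuits, and there the
-- disjunct it feeds is true either way (0 != 1).
def calculate_run_lengths_alt (sequence : List Int) : List (Int × Int) :=
  let n := sequence.length
  let starts := (List.range n).filter
    (fun i => sequence.getD i 0 == 1 && (i == 0 || !(sequence.getD (i - 1) 0 == 1)))
  let ends := (List.range n).filter
    (fun i => sequence.getD i 0 == 1 && (i == n - 1 || !(sequence.getD (i + 1) 0 == 1)))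
  let lengths := (starts.zip ends).map (fun p => ((p.2 : Int) - (p.1 : Int) + 1))
  (PySem.Dict.counter lengths).items

-- ===== PRECONDITION & SPEC =====
def Spec_calculate_run_lengths (sequence : List Int) (out : List (Int × Int)) : Prop := out = calculate_run_lengths_alt sequence
instance (sequence : List Int) (out : List (Int × Int)) : Decidable (Spec_calculate_run_lengths sequence out) := by unfold Spec_calculate_run_lengths; infer_instance

-- ===== CLAIM (what is proved, stated in full; the proofs are below) =====
def Claim_equal_calculate_run_lengths : Prop := ∀ (sequence : List Int), Dom_calculate_run_lengths sequence → Spec_calculate_run_lengths sequence (calculate_run_lengths sequence)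

-- ===== LEMMAS AND PROOFS =====

-- The run lengths of 1s in `xs`, with a pending run of length `cur` already open.
def pendLens (cur : Int) : List Int → List Int
  | [] => if 0 < cur then [cur] else []
  | x :: xs => if x = 1 then pendLens (cur + 1) xs
               else (if 0 < cur then [cur] else []) ++ pendLens 0 xs

-- A's fold (with the trailing flush) computes `runs ++ pendLens cur xs`.
theorem foldA_eq (xs : List Int) (runs : List Int) (cur : Int) (hc : 0 ≤ cur) :
    (let st := xs.foldl
        (fun (s : List Int × Int × Bool) x =>
          if x == 1 then (s.1, s.2.1 + 1, true)
          else ((if s.2.2 && decide (s.2.1 > 0) then s.1 ++ [s.2.1] else s.1), 0, false))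
        (runs, cur, decide (0 < cur));
      if st.2.2 && decide (st.2.1 > 0) then st.1 ++ [st.2.1] else st.1)
    = runs ++ pendLens cur xs := by
  induction xs generalizing runs cur with
  | nil =>
    simp only [List.foldl_nil, pendLens]
    by_cases h : 0 < cur <;> simp [h]
  | cons x xs ih =>
    simp only [List.foldl_cons, pendLens]
    by_cases hx : x = 1
    · subst hx
      have h1 : decide ((0:Int) < cur + 1) = true := by simp; omega
      have t := ih runs (cur + 1) (by omega)
      rw [h1] at t
      simpa using t
    · have hbe : (x == (1:Int)) = false := by simp [hx]
      have h0 : decide ((0:Int) < 0) = false := by decide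
      have t := ih (if decide (0 < cur) && decide (cur > 0) then runs ++ [cur] else runs) 0 le_rfl
      rw [h0] at t
      simp only [hbe, Bool.false_eq_true, if_false, if_neg hx]
      rw [t]
      by_cases h : 0 < cur <;> simp [h, gt_iff_lt, List.append_assoc]

theorem pendLens_ones (g : List Int) (rest : List Int) (cur : Int)
    (hg : ∀ y ∈ g, y = 1) :
    pendLens cur (g ++ rest) = pendLens (cur + g.length) rest := by
  induction g generalizing cur with
  | nil => simp
  | cons y ys ih =>
    have hy : y = 1 := hg y (List.mem_cons_self ..)
    simp only [List.cons_append, pendLens, if_pos hy]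
    rw [ih (cur + 1) (fun z hz => hg z (List.mem_cons_of_mem _ hz))]
    simp only [List.length_cons]
    congr 1
    push_cast
    ring

-- Closing a pending positive run when the next element (if any) is not 1.
theorem pendLens_close (k : Int) (hk : 0 < k) (rest : List Int)
    (h : rest.headD 0 ≠ 1) :
    pendLens k rest = k :: pendLens 0 rest := by
  cases rest with
  | nil => simp [pendLens, hk]
  | cons r rs =>
    have hr : r ≠ 1 := by simpa using h
    simp [pendLens, hr, hk]

-- Recursive characterisation of the run-START indices; p1 = "previous element was 1".
def Sstarts (p1 : Bool) : List Int → List Nat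
  | [] => []
  | x :: xs => if x == 1 && !p1 then 0 :: (Sstarts (x == 1) xs).map (· + 1)
               else (Sstarts (x == 1) xs).map (· + 1)

-- Recursive characterisation of the run-END indices.
def Eends : List Int → List Nat
  | [] => []
  | x :: xs => if x == 1 && !(xs.headD 0 == 1) then 0 :: (Eends xs).map (· + 1)
               else (Eends xs).map (· + 1)

-- The starts comprehension equals Sstarts (with the previous-element flag made explicit).
theorem starts_filter_eq (l : List Int) (p1 : Bool) :
    (List.range l.length).filter
      (fun i => l.getD i 0 == 1 && ((i == 0 && !p1) || !(l.getD (i - 1) 0 == 1)))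
    = Sstarts p1 l := by
  induction l generalizing p1 with
  | nil => simp [Sstarts]
  | cons x xs ih =>
    rw [List.length_cons, List.range_succ_eq_map, List.filter_cons, List.filter_map]
    have hsh : ((List.range xs.length).filter
        ((fun i => (x :: xs).getD i 0 == 1 &&
          ((i == 0 && !p1) || !((x :: xs).getD (i - 1) 0 == 1))) ∘ Nat.succ))
        = (List.range xs.length).filter
        (fun i => xs.getD i 0 == 1 && ((i == 0 && !(x == 1)) || !(xs.getD (i - 1) 0 == 1))) := by
      apply List.filter_congr
      intro i _
      cases i with
      | zero =>
        simp only [Function.comp_apply, List.getD, Nat.succ_eq_add_one, List.getElem?_cons_succ,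
          Nat.add_sub_cancel, List.getElem?_cons_zero, Option.getD_some]
        simp only [show (0 + 1 == 0) = false from rfl, Bool.false_and, Bool.false_or]
        cases h : (xs[0]?.getD 0 == (1:Int)) <;> simp_all
      | succ j => simp [List.getD]
    rw [hsh, ih (x == 1)]
    by_cases hx : x = 1
    · subst hx
      cases p1 <;> simp [Sstarts, List.getD]
    · have hbe : (x == (1:Int)) = false := by simp [hx]
      simp [Sstarts, hbe, List.getD]

-- The ends comprehension equals Eends.
theorem ends_filter_eq (l : List Int) :
    (List.range l.length).filter
      (fun i => l.getD i 0 == 1 && ((i == l.length - 1) || !(l.getD (i + 1) 0 == 1)))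
    = Eends l := by
  induction l with
  | nil => simp [Eends]
  | cons x xs ih =>
    rw [List.length_cons, List.range_succ_eq_map, List.filter_cons, List.filter_map]
    have hsh : ((List.range xs.length).filter
        ((fun i => (x :: xs).getD i 0 == 1 &&
          ((i == xs.length + 1 - 1) || !((x :: xs).getD (i + 1) 0 == 1))) ∘ Nat.succ))
        = (List.range xs.length).filter
        (fun i => xs.getD i 0 == 1 && ((i == xs.length - 1) || !(xs.getD (i + 1) 0 == 1))) := by
      apply List.filter_congr
      intro i hi
      have hlt : i < xs.length := List.mem_range.mp hi
      have : (Nat.succ i == xs.length + 1 - 1) = (i == xs.length - 1) := by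
        simp only [Nat.add_sub_cancel]
        rcases Nat.eq_or_lt_of_le (Nat.succ_le_of_lt hlt) with h | h
        · simp
          omega
        · have h1 : i + 1 ≠ xs.length := by omega
          have h2 : i ≠ xs.length - 1 := by omega
          simp [h1, h2]
      simp only [Function.comp_apply, List.getD_cons_succ, this]
    rw [hsh, ih]
    -- head condition: (0 == n-1 || (x::xs).getD 1 ≠ 1) = (xs.headD 0 ≠ 1)
    have hhd : ((0 == xs.length + 1 - 1) || !((x :: xs).getD (0 + 1) 0 == 1))
        = !(xs.headD 0 == 1) := by
      cases xs with
      | nil => simp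
      | cons y ys => simp [List.getD]
    simp only [List.getD_cons_zero, hhd, Eends]

-- Sstarts ignores the flag when the list is empty or does not start with 1.
theorem Sstarts_flag_irrel (l : List Int) (h : l.headD 0 ≠ 1) :
    Sstarts true l = Sstarts false l := by
  cases l with
  | nil => rfl
  | cons r rs =>
    have hr : (r == (1:Int)) = false := by simp; simpa using h
    simp [Sstarts, hr]

theorem Sstarts_ones_true (g : List Int) (rest : List Int)
    (hg : ∀ y ∈ g, y = 1) (hr : rest.headD 0 ≠ 1) :
    Sstarts true (g ++ rest) = (Sstarts false rest).map (· + g.length) := by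
  induction g with
  | nil =>
    rw [List.nil_append, Sstarts_flag_irrel rest hr]
    simp
  | cons y ys ih =>
    have hy : y = 1 := hg y (List.mem_cons_self ..)
    subst hy
    simp only [List.cons_append, Sstarts, beq_self_eq_true, Bool.not_true, Bool.and_false,
      Bool.false_eq_true, if_false]
    rw [ih (fun z hz => hg z (List.mem_cons_of_mem _ hz)), List.map_map]
    simp only [List.length_cons]
    apply List.map_congr_left
    intro a _
    simp
    omega

theorem Eends_ones (g : List Int) (rest : List Int)
    (hg : ∀ y ∈ g, y = 1) (hne : g ≠ []) (hr : rest.headD 0 ≠ 1) :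
    Eends (g ++ rest) = (g.length - 1) :: (Eends rest).map (· + g.length) := by
  induction g with
  | nil => exact absurd rfl hne
  | cons y ys ih =>
    have hy : y = 1 := hg y (List.mem_cons_self ..)
    subst hy
    cases ys with
    | nil =>
      cases rest with
      | nil => simp [Eends]
      | cons r rs =>
        have hrb : ((r : Int) == 1) = false := by simpa using hr
        simp [Eends, hrb]
    | cons z zs =>
      have hz : z = 1 := hg z (by simp)
      subst hz
      have t := ih (fun w hw => hg w (List.mem_cons_of_mem _ hw)) (by simp)
      simp only [List.cons_append] at t ⊢
      rw [show Eends ((1:Int) :: 1 :: (zs ++ rest)) = (Eends (1 :: (zs ++ rest))).map (· + 1) from by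
        simp only [Eends, List.headD_cons, beq_self_eq_true, Bool.not_true, Bool.and_false,
          Bool.false_eq_true, if_false]]
      rw [t, List.map_cons, List.map_map]
      simp only [List.length_cons, Nat.add_sub_cancel]
      refine congrArg₂ List.cons rfl ?_
      apply List.map_congr_left
      intro a _
      simp only [Function.comp_apply]
      omega

-- Pair up starts and ends and take the lengths: this equals pendLens 0.
theorem zipSE_eq_pendLens (l : List Int) :
    ((Sstarts false l).zip (Eends l)).map (fun p => ((p.2 : Int) - (p.1 : Int) + 1))
    = pendLens 0 l := by
  match l with
  | [] => rfl
  | x :: xs =>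
    by_cases hx : x = 1
    · subst hx
      set t := xs.takeWhile (· == (1:Int)) with htdef
      set rest := xs.dropWhile (· == (1:Int)) with hrdef
      have hxs : t ++ rest = xs := List.takeWhile_append_dropWhile
      have ht1 : ∀ y ∈ t, y = (1:Int) := by
        intro y hy; rw [htdef] at hy; simpa using List.mem_takeWhile_imp hy
      have hrh : rest.headD 0 ≠ 1 := by
        cases hrest : rest with
        | nil => simp
        | cons r rs =>
          have h := List.head?_dropWhile_not (· == (1:Int)) xs
          rw [← hrdef, hrest] at h
          simp only [List.head?_cons] at h
          simpa using h
      have hg1 : ∀ y ∈ (1:Int) :: t, y = (1:Int) :=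
        fun y hy => (List.mem_cons.mp hy).elim (fun h => h) (fun h => ht1 y h)
      have hdecomp : (1:Int) :: xs = ((1:Int) :: t) ++ rest := by
        rw [List.cons_append, hxs]
      -- starts side
      have hS : Sstarts false ((1:Int) :: xs)
          = 0 :: (Sstarts false rest).map (· + (t.length + 1)) := by
        simp only [Sstarts, beq_self_eq_true, Bool.not_false, Bool.and_true, if_true]
        rw [show xs = t ++ rest from hxs.symm, Sstarts_ones_true t rest ht1 hrh, List.map_map]
        refine congrArg₂ List.cons rfl ?_
        apply List.map_congr_left
        intro a _
        simp only [Function.comp_apply]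
        omega
      have hE : Eends ((1:Int) :: xs)
          = t.length :: (Eends rest).map (· + (t.length + 1)) := by
        rw [hdecomp, Eends_ones ((1:Int) :: t) rest hg1 (by simp) hrh]
        simp
      rw [hS, hE]
      simp only [List.zip_cons_cons, List.map_cons]
      have ih := zipSE_eq_pendLens rest
      have hzip : (((Sstarts false rest).map (· + (t.length + 1))).zip
            ((Eends rest).map (· + (t.length + 1)))).map
            (fun p => ((p.2 : Int) - (p.1 : Int) + 1))
          = ((Sstarts false rest).zip (Eends rest)).map
            (fun p => ((p.2 : Int) - (p.1 : Int) + 1)) := by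
        rw [List.zip_map, List.map_map]
        apply List.map_congr_left
        intro p _
        simp only [Function.comp_apply, Prod.map]
        push_cast
        ring
      rw [hzip, ih]
      -- pendLens side
      have hpos : (0:Int) < 0 + (((1:Int) :: t).length : Int) := by
        simp only [List.length_cons]
        push_cast
        omega
      have hplen : pendLens 0 ((1:Int) :: xs) = ((t.length : Int) + 1) :: pendLens 0 rest := by
        rw [hdecomp, pendLens_ones ((1:Int) :: t) rest 0 hg1, pendLens_close _ hpos _ hrh]
        simp only [List.length_cons]
        push_cast
        ring_nf
      rw [hplen]
      refine congrArg₂ List.cons ?_ rfl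
      push_cast
      ring
    · have hbe : (x == (1:Int)) = false := by simp [hx]
      have hS : Sstarts false (x :: xs) = (Sstarts false xs).map (· + 1) := by
        simp [Sstarts, hbe]
      have hE : Eends (x :: xs) = (Eends xs).map (· + 1) := by
        simp [Eends, hbe]
      rw [hS, hE, List.zip_map, List.map_map]
      have hmm : ((Sstarts false xs).zip (Eends xs)).map
            ((fun p => ((p.2 : Int) - (p.1 : Int) + 1)) ∘
              (Prod.map (· + 1) (· + 1) : ℕ × ℕ → ℕ × ℕ))
          = ((Sstarts false xs).zip (Eends xs)).map
            (fun p => ((p.2 : Int) - (p.1 : Int) + 1)) := by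
        apply List.map_congr_left
        intro p _
        simp only [Function.comp_apply, Prod.map]
        push_cast
        ring
      rw [hmm, zipSE_eq_pendLens xs]
      simp [pendLens, hx]
  termination_by l.length
  decreasing_by
    · simp only [List.length_cons]
      exact Nat.lt_succ_of_le (List.length_dropWhile_le _ _)
    · simp

-- B's starts predicate (with `i == 0` literal) equals the flagged one at p1 = false.
theorem starts_pred_top (l : List Int) :
    (List.range l.length).filter
      (fun i => l.getD i 0 == 1 && (i == 0 || !(l.getD (i - 1) 0 == 1)))
    = Sstarts false l := by
  rw [← starts_filter_eq l false]
  apply List.filter_congr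
  intro i _
  simp

-- ===== VERDICT (by name: the statement is the Claim_ definition above) =====
theorem calculate_run_lengths_spec : Claim_equal_calculate_run_lengths := by
  intro sequence _
  unfold Spec_calculate_run_lengths
  have hA : calculate_run_lengths sequence
      = (PySem.Dict.counter (pendLens 0 sequence)).items := by
    unfold calculate_run_lengths
    exact congrArg (fun r => (PySem.Dict.counter r).items)
      (by simpa using foldA_eq sequence [] 0 le_rfl)
  have hB : calculate_run_lengths_alt sequence
      = (PySem.Dict.counter (pendLens 0 sequence)).items := by
    unfold calculate_run_lengths_alt
    simp only [starts_pred_top, ends_filter_eq, zipSE_eq_pendLens]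
  rw [hA, hB]
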